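-- pv_equiv track=rewrite | github.com/azizlahmedi/iadevtools | neoxam/versioning/mphash.py | rad2asc
-- ===== SOURCE A (Python) =====
-- rad50 = " ABCDEFGHIJKLMNOPQRSTUVWXYZ$.%0123456789"
--
-- def rad2asc(rad, s):
--     tmp = 0
--     s = list(s)
--     for i in range(len(s)):
--         if not i % 3:
--             tmp = rad & 0xffff
--             rad >>= 16
--
--         if i % 3 == 0:
--             s[i] = rad50[(tmp // (40 * 40)) % 40]
--         elif i % 3 == 1:
--             s[i] = rad50[(tmp // 40) % 40]
--         elif i % 3 == 2:
--             s[i] = rad50[tmp % 40]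
--     return "".join(s)
-- ===== SOURCE B (Python) =====
-- rad50 = " ABCDEFGHIJKLMNOPQRSTUVWXYZ$.%0123456789"
--
-- def rad2asc(rad, s):
--     n = len(s)
--     out = []
--     for _ in range((n + 2) // 3):
--         w = rad & 0xffff
--         rad >>= 16
--         out.append(rad50[(w // 1600) % 40])
--         out.append(rad50[(w // 40) % 40])
--         out.append(rad50[w % 40])
--     return "".join(out)[:n]
-- ===== Notes on version B (the rewrite author's own statement) =====
-- stated objective: simpler
-- what changed: Replaces the per-character %3 state machine that mutates a copy of s with a word-at-a-time loop (ceil(n/3) iterations) that decodes all three characters of each 16-bit word at once and truncates the joined result to len(s).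
import Mathlib
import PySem

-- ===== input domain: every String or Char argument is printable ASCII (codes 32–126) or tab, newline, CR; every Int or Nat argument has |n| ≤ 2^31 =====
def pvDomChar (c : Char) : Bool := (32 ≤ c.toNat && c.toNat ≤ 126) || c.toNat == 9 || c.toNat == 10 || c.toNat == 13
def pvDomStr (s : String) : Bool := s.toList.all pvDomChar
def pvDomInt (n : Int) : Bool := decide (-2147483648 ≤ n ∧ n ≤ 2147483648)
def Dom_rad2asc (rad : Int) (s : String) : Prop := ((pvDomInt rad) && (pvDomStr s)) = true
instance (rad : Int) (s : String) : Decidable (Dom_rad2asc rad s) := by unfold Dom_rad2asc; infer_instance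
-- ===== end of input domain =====

-- B replaces A's per-character %3 state machine (which mutates a copy of s) by a
-- word-at-a-time loop decoding all three characters of each 16-bit word at once,
-- then truncating to len(s); same linear cost, simpler decomposition.

-- the module constant rad50 (shared by both Pythons)
def rad50T : List Char := " ABCDEFGHIJKLMNOPQRSTUVWXYZ$.%0123456789".toList

-- ===== PORT A =====
-- loop body of A (indexing rad50[k] is ported with pyGetD and an arbitrary default:
-- k = (…) % 40 is always in [0,40), so Python never raises there)
def stepA (st : Int × Int × List Char) (i : Nat) : Int × Int × List Char :=
  let tmp := st.1
  let r := st.2.1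
  let cs := st.2.2
  let p : Int × Int := if i % 3 = 0 then (PySem.Int.band r 65535, r >>> (16 : Int)) else (tmp, r)
  let tmp := p.1
  let r := p.2
  let cs :=
    if i % 3 = 0 then
      cs.set i (PySem.List.pyGetD rad50T (PySem.Int.mod (PySem.Int.floordiv tmp (40 * 40)) 40) ' ')
    else if i % 3 = 1 then
      cs.set i (PySem.List.pyGetD rad50T (PySem.Int.mod (PySem.Int.floordiv tmp 40) 40) ' ')
    else
      cs.set i (PySem.List.pyGetD rad50T (PySem.Int.mod tmp 40) ' ')
  (tmp, r, cs)

def rad2asc (rad : Int) (s : String) : String :=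
  String.mk (((List.range s.toList.length).foldl stepA (0, rad, s.toList)).2.2)

-- ===== PORT B =====
-- loop body of B: decode one 16-bit word into its three rad50 characters
def stepB (st : Int × List Char) (_ : Nat) : Int × List Char :=
  let w := PySem.Int.band st.1 65535
  let r := st.1 >>> (16 : Int)
  (r, st.2 ++
    [PySem.List.pyGetD rad50T (PySem.Int.mod (PySem.Int.floordiv w 1600) 40) ' ',
     PySem.List.pyGetD rad50T (PySem.Int.mod (PySem.Int.floordiv w 40) 40) ' ',
     PySem.List.pyGetD rad50T (PySem.Int.mod w 40) ' '])

def rad2asc_alt (rad : Int) (s : String) : String :=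
  String.mk
    ((((List.range ((s.toList.length + 2) / 3)).foldl stepB (rad, [])).2).take s.toList.length)

-- ===== PRECONDITION & SPEC =====
def Spec_rad2asc (rad : Int) (s : String) (out : String) : Prop := out = rad2asc_alt rad s
instance (rad : Int) (s : String) (out : String) : Decidable (Spec_rad2asc rad s out) := by unfold Spec_rad2asc; infer_instance

-- ===== CLAIM (what is proved, stated in full; the proofs are below) =====
def Claim_equal_rad2asc : Prop := ∀ (rad : Int) (s : String), Dom_rad2asc rad s → Spec_rad2asc rad s (rad2asc rad s)

-- ===== LEMMAS AND PROOFS =====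

-- rad shifted right by k bits (Python's rad >> 16 iterated)
def pvShr (a : Int) (k : Nat) : Int := a >>> (k : Int)

-- the j-th 16-bit word of rad
def pvW (rad : Int) (j : Nat) : Int := PySem.Int.band (pvShr rad (16 * j)) 65535

-- the i-th decoded character
def pvC (rad : Int) (i : Nat) : Char :=
  let w := pvW rad (i / 3)
  if i % 3 = 0 then PySem.List.pyGetD rad50T (PySem.Int.mod (PySem.Int.floordiv w 1600) 40) ' '
  else if i % 3 = 1 then PySem.List.pyGetD rad50T (PySem.Int.mod (PySem.Int.floordiv w 40) 40) ' '
  else PySem.List.pyGetD rad50T (PySem.Int.mod w 40) ' '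

-- tmp after n iterations of A's loop
def pvT (rad : Int) (n : Nat) : Int := if n = 0 then 0 else pvW rad ((n - 1) / 3)

theorem pvShr_zero (a : Int) : pvShr a 0 = a := by
  unfold pvShr
  cases a with
  | ofNat m => exact_mod_cast Int.shiftRight_natCast m 0
  | negSucc m => simpa using Int.shiftRight_negSucc m 0

theorem pvShr_add (a : Int) (m n : Nat) : pvShr (pvShr a m) n = pvShr a (m + n) := by
  unfold pvShr
  rw [Nat.cast_add, Int.shiftRight_add']

theorem pvShr_shift16 (a : Int) (m : Nat) : pvShr a m >>> (16 : Int) = pvShr a (m + 16) := by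
  have h := pvShr_add a m 16
  simpa [pvShr] using h

theorem set_append_length {α : Type} (l1 l2 : List α) (x : α) :
    (l1 ++ l2).set l1.length x = l1 ++ l2.set 0 x := by
  induction l1 with
  | nil => rfl
  | cons h t ih => simp [ih]

theorem set_append_drop {α : Type} (l1 cs : List α) (x : α) (h : l1.length < cs.length) :
    (l1 ++ cs.drop l1.length).set l1.length x = l1 ++ x :: cs.drop (l1.length + 1) := by
  rw [set_append_length]
  congr 1
  rw [List.drop_eq_getElem_cons h]
  rfl

theorem stepA_0 (t r : Int) (cs : List Char) (i : Nat) (h : i % 3 = 0) :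
    stepA (t, r, cs) i =
      (PySem.Int.band r 65535, r >>> (16 : Int),
        cs.set i (PySem.List.pyGetD rad50T
          (PySem.Int.mod (PySem.Int.floordiv (PySem.Int.band r 65535) (40 * 40)) 40) ' ')) := by
  simp [stepA, h]

theorem stepA_1 (t r : Int) (cs : List Char) (i : Nat) (h : i % 3 = 1) :
    stepA (t, r, cs) i =
      (t, r, cs.set i (PySem.List.pyGetD rad50T
        (PySem.Int.mod (PySem.Int.floordiv t 40) 40) ' ')) := by
  simp [stepA, h]

theorem stepA_2 (t r : Int) (cs : List Char) (i : Nat) (h : i % 3 = 2) :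
    stepA (t, r, cs) i =
      (t, r, cs.set i (PySem.List.pyGetD rad50T (PySem.Int.mod t 40) ' ')) := by
  simp [stepA, h]

theorem invA (rad : Int) (cs : List Char) (n : Nat) (hn : n ≤ cs.length) :
    (List.range n).foldl stepA (0, rad, cs) =
      (pvT rad n, pvShr rad (16 * ((n + 2) / 3)),
        (List.range n).map (pvC rad) ++ cs.drop n) := by
  induction n with
  | zero => simp [pvT, pvShr_zero]
  | succ n ih =>
    have hlen : ((List.range n).map (pvC rad)).length = n := by simp
    have hset : ∀ x : Char,
        ((List.range n).map (pvC rad) ++ cs.drop n).set n x =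
          (List.range n).map (pvC rad) ++ x :: cs.drop (n + 1) := by
      intro x
      have h' := set_append_drop ((List.range n).map (pvC rad)) cs x (by simpa using hn)
      simpa [hlen] using h'
    have h3 : n % 3 = 0 ∨ n % 3 = 1 ∨ n % 3 = 2 := by omega
    rw [List.range_succ, List.foldl_append, ih (by omega)]
    simp only [List.foldl_cons, List.foldl_nil]
    rcases h3 with h | h | h
    · -- n % 3 = 0 : a new word is fetched
      have hq2 : (n + 2) / 3 = n / 3 := by omega
      have hq3 : (n + 1 + 2) / 3 = n / 3 + 1 := by omega
      have hq1 : (n + 1 - 1) / 3 = n / 3 := by omega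
      rw [stepA_0 _ _ _ _ h, hset]
      simp only [Prod.mk.injEq]
      refine ⟨?_, ?_, ?_⟩
      · rw [hq2]; simp [pvT, pvW]
      · rw [hq2, pvShr_shift16, hq3]
        congr 1
      · simp only [List.map_append, List.map_cons, List.map_nil]
        rw [List.append_cons]
        congr 2
        norm_num [pvC, pvW, h, hq2]
    · -- n % 3 = 1 : tmp is reused
      have hq2 : (n + 2) / 3 = (n + 1 + 2) / 3 := by omega
      have hq1 : (n + 1 - 1) / 3 = (n - 1) / 3 := by omega
      have hq0 : (n - 1) / 3 = n / 3 := by omega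
      have hne : ¬ n = 0 := by omega
      rw [stepA_1 _ _ _ _ h, hset]
      simp only [Prod.mk.injEq]
      refine ⟨?_, ?_, ?_⟩
      · simp [pvT, hne, hq0]
      · rw [hq2]
      · simp only [List.map_append, List.map_cons, List.map_nil]
        rw [List.append_cons]
        congr 2
        norm_num [pvC, pvT, pvW, hne, h, hq0]
    · -- n % 3 = 2 : tmp is reused
      have hq2 : (n + 2) / 3 = (n + 1 + 2) / 3 := by omega
      have hq1 : (n + 1 - 1) / 3 = (n - 1) / 3 := by omega
      have hq0 : (n - 1) / 3 = n / 3 := by omega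
      have hne : ¬ n = 0 := by omega
      rw [stepA_2 _ _ _ _ h, hset]
      simp only [Prod.mk.injEq]
      refine ⟨?_, ?_, ?_⟩
      · simp [pvT, hne, hq0]
      · rw [hq2]
      · simp only [List.map_append, List.map_cons, List.map_nil]
        rw [List.append_cons]
        congr 2
        norm_num [pvC, pvT, pvW, hne, h, hq0]

theorem invB (rad : Int) (acc : List Char) (k : Nat) :
    (List.range k).foldl stepB (rad, acc) =
      (pvShr rad (16 * k), acc ++ (List.range (3 * k)).map (pvC rad)) := by
  induction k with
  | zero => simp [pvShr_zero]
  | succ k ih =>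
    rw [List.range_succ, List.foldl_append, ih]
    simp only [List.foldl_cons, List.foldl_nil, stepB, Prod.mk.injEq]
    refine ⟨?_, ?_⟩
    · rw [pvShr_shift16]
      congr 1
    · have h3 : 3 * (k + 1) = 3 * k + 1 + 1 + 1 := by ring
      have e0 : (3 * k) % 3 = 0 := by omega
      have e0' : (3 * k) / 3 = k := by omega
      have e1 : (3 * k + 1) % 3 = 1 := by omega
      have e1' : (3 * k + 1) / 3 = k := by omega
      have e2 : (3 * k + 2) % 3 = 2 := by omega
      have e2' : (3 * k + 2) / 3 = k := by omega
      rw [h3, List.range_succ, List.range_succ, List.range_succ]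
      simp [pvC, pvW, e0, e0', e1, e1', e2, e2']

-- ===== VERDICT (by name: the statement is the Claim_ definition above) =====
theorem rad2asc_spec : Claim_equal_rad2asc := by
  intro rad s _
  unfold Spec_rad2asc rad2asc rad2asc_alt
  rw [invA rad s.toList s.toList.length le_rfl, invB]
  have hle : s.length ≤ 3 * ((s.length + 2) / 3) := by omega
  have htake :
      ((List.map (pvC rad) (List.range (3 * ((s.length + 2) / 3)))).take s.length) =
        (List.range s.length).map (pvC rad) := by
    apply List.ext_getElem
    · simpa using Nat.min_eq_left hle
    · intro i h1 h2
      simp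
  have hd : List.drop s.length s.toList = [] := by
    apply List.drop_eq_nil_of_le
    simp
  simp [hd, htake]
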